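-- pv_equiv track=rewrite | github.com/shekharkrishna/Amazon-2020-Prep | Online Assesment/Transaction Logs/4listoflistImpl.py | transactionThreashold
-- ===== SOURCE A (Python) =====
-- from collections import defaultdict
--
-- def transactionThreashold(logs):
--     threasholdMap = defaultdict(int)
--     threashold = 2
--     individual_items = []
--     user_id = []
--
--     for log in logs:
--         transaction = log[0].split(' ')
--         for tran in set(transaction[:2]): # PJ: 1. to get last element ignored in loop Plus the set concept to avoid duplicate
--             threasholdMap[tran] += 1
--
--     for key in threasholdMap:
--         if threasholdMap[key] >= threashold:
--             user_id.append(key)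
--
--     return sorted(user_id)
-- ===== SOURCE B (Python) =====
-- def transactionThreashold(logs):
--     tokens = []
--     for log in logs:
--         tokens.extend(set(log[0].split(' ')[:2]))
--     tokens.sort()
--     if not tokens:
--         return []
--     result = []
--     cur, run = tokens[0], 1
--     for t in tokens[1:]:
--         if t == cur:
--             run += 1
--         else:
--             if run >= 2:
--                 result.append(cur)
--             cur, run = t, 1
--     if run >= 2:
--         result.append(cur)
--     return result
-- ===== Notes on version B (the rewrite author's own statement) =====
-- stated objective: alternative
-- what changed: B replaces the hash-map counting pass plus final sort by flattening the per-log deduplicated token pairs into one list, sorting it, and emitting users whose consecutive run has length >= 2 in a single scan (no dict at all); output is already sorted.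
import Mathlib
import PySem

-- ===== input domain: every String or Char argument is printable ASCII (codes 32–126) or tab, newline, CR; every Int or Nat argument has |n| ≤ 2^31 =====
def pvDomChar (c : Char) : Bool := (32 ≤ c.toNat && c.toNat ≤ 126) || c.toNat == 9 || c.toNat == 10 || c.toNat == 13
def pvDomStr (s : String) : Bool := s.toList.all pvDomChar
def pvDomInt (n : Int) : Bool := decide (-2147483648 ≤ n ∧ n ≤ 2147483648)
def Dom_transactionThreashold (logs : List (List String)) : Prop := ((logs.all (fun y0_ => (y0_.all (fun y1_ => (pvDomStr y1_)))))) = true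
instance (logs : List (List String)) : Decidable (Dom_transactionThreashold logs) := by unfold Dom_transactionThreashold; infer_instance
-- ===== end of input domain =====

-- B replaces A's hash-map counting + final sort by sort-then-run-scan over the flattened tokens; return values proved equal (objective: alternative).

-- ===== PORT A =====
def transactionThreashold (logs : List (List String)) : List String :=
  let threasholdMap : PySem.Dict String Int :=
    logs.foldl (fun d log =>
      let transaction := ((PySem.Str.split? ((PySem.List.pyGet? log 0).getD "") " ").getD [])
      (PySem.Set.ofList (PySem.List.slice transaction none (some 2))).foldl
        (fun d tran => d.modify tran 0 (· + 1)) d)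
      PySem.Dict.empty
  let user_id :=
    threasholdMap.keys.foldl
      (fun acc key => if 2 ≤ threasholdMap.getD key 0 then acc ++ [key] else acc) []
  PySem.List.sorted user_id (fun x => x) false

-- ===== PORT B =====
-- the for-loop of Source B over the remaining tokens, carrying (cur, run); the trailing
-- 'if run >= 2: result.append(cur)' is the base case
def runAux (cur : String) (run : Nat) : List String → List String
  | [] => if 2 ≤ run then [cur] else []
  | y :: rest =>
    if y = cur then runAux cur (run + 1) rest
    else (if 2 ≤ run then [cur] else []) ++ runAux y 1 rest

def transactionThreashold_alt (logs : List (List String)) : List String :=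
  let tokens := logs.flatMap (fun log =>
    PySem.Set.ofList (PySem.List.slice (((PySem.Str.split? ((PySem.List.pyGet? log 0).getD "") " ").getD [])) none (some 2)))
  match PySem.List.sorted tokens (fun x => x) false with
  | [] => []
  | x :: rest => runAux x 1 rest

-- ===== PRECONDITION & SPEC =====
-- Pre_ excludes only logs containing an empty inner list, on which A raises IndexError at log[0].
def Pre_transactionThreashold (logs : List (List String)) : Prop := ∀ log ∈ logs, log ≠ []
instance (logs : List (List String)) : Decidable (Pre_transactionThreashold logs) := by unfold Pre_transactionThreashold; infer_instance
def pvWitness_transactionThreashold : List (List String) := [["u1 u2 50"], ["u2 u3 10"]]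

def Spec_transactionThreashold (logs : List (List String)) (out : List String) : Prop := out = transactionThreashold_alt logs
instance (logs : List (List String)) (out : List String) : Decidable (Spec_transactionThreashold logs out) := by unfold Spec_transactionThreashold; infer_instance

-- ===== CLAIM (what is proved, stated in full; the proofs are below) =====
def Claim_equal_transactionThreashold : Prop := ∀ (logs : List (List String)), Dom_transactionThreashold logs → Pre_transactionThreashold logs → Spec_transactionThreashold logs (transactionThreashold logs)

-- ===== LEMMAS AND PROOFS =====

-- the flattened deduplicated token list both programs count
def pvFlat (logs : List (List String)) : List String :=
  logs.flatMap (fun log =>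
    PySem.Set.ofList (PySem.List.slice (((PySem.Str.split? ((PySem.List.pyGet? log 0).getD "") " ").getD [])) none (some 2)))

lemma foldl_flatMap' {α β σ : Type} (g : σ → β → σ) (f : α → List β) (l : List α) (init : σ) :
    (l.flatMap f).foldl g init = l.foldl (fun s a => (f a).foldl g s) init := by
  induction l generalizing init with
  | nil => rfl
  | cons a t ih => simp [List.flatMap_cons, List.foldl_append, ih]

lemma A_eq_sorted_filter (logs : List (List String)) :
    transactionThreashold logs =
      PySem.List.sorted
        ((PySem.Set.ofList (pvFlat logs)).filter (fun k => decide ((2:Int) ≤ ((pvFlat logs).count k : Int))))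
        (fun x => x) false := by
  unfold transactionThreashold
  have hmap : logs.foldl (fun d log =>
      let transaction := ((PySem.Str.split? ((PySem.List.pyGet? log 0).getD "") " ").getD [])
      (PySem.Set.ofList (PySem.List.slice transaction none (some 2))).foldl
        (fun d tran => d.modify tran 0 (· + 1)) d)
      PySem.Dict.empty = PySem.Dict.counter (pvFlat logs) := by
    rw [PySem.Dict.counter_eq_foldl, pvFlat, foldl_flatMap']
  simp only [hmap]
  rw [PySem.List.foldl_append_ite_eq_filter]
  simp only [PySem.Dict.keys_counter, PySem.Dict.getD_counter, List.nil_append]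

lemma runAux_mem (cur x : String) (run : Nat) (l : List String)
    (hs : l.Pairwise (· ≤ ·)) (hc : ∀ y ∈ l, cur ≤ y) :
    x ∈ runAux cur run l ↔
      ((x = cur ∧ 2 ≤ run + l.count cur) ∨ (x ∈ l ∧ cur < x ∧ 2 ≤ l.count x)) := by
  induction l generalizing cur run with
  | nil =>
    rw [runAux]
    split_ifs with h
    · simp only [List.mem_singleton, List.count_nil, List.not_mem_nil, false_and, or_false,
        Nat.add_zero]
      constructor
      · rintro rfl; exact ⟨rfl, by omega⟩
      · rintro ⟨rfl, _⟩; rfl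
    · simp only [List.not_mem_nil, List.count_nil, false_iff, Nat.add_zero]
      rintro (⟨rfl, h2⟩ | ⟨h2, _⟩)
      · omega
      · exact h2
  | cons y rest ih =>
    have hs' : rest.Pairwise (· ≤ ·) := hs.of_cons
    have hy : ∀ z ∈ rest, y ≤ z := (List.pairwise_cons.mp hs).1
    by_cases hyc : y = cur
    · subst hyc
      rw [runAux, if_pos rfl, ih y (run + 1) hs' hy]
      constructor
      · rintro (⟨rfl, h⟩ | ⟨hm, hlt, hcnt⟩)
        · exact Or.inl ⟨rfl, by rw [List.count_cons_self]; omega⟩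
        · refine Or.inr ⟨List.mem_cons_of_mem _ hm, hlt, ?_⟩
          rw [List.count_cons_of_ne (ne_of_lt hlt)]
          exact hcnt
      · rintro (⟨rfl, h⟩ | ⟨hm, hlt, hcnt⟩)
        · rw [List.count_cons_self] at h
          exact Or.inl ⟨rfl, by omega⟩
        · have hxy : x ≠ y := ne_of_gt hlt
          have hm' : x ∈ rest := by
            rcases List.mem_cons.mp hm with h' | h'
            · exact absurd h' hxy
            · exact h'
          refine Or.inr ⟨hm', hlt, ?_⟩
          rw [List.count_cons_of_ne (Ne.symm hxy)] at hcnt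
          exact hcnt
    · have hcy : cur < y := lt_of_le_of_ne (hc y (List.mem_cons_self)) (fun h => hyc h.symm)
      have hnotmem : cur ∉ y :: rest := by
        intro hm
        rcases List.mem_cons.mp hm with h' | h'
        · exact hyc h'.symm
        · exact absurd (hy cur h') (not_le.mpr hcy)
      have hcnt0 : (y :: rest).count cur = 0 := List.count_eq_zero.mpr hnotmem
      rw [runAux, if_neg hyc, List.mem_append, ih y 1 hs' hy]
      constructor
      · rintro (hmem | (⟨rfl, h⟩ | ⟨hm, hlt, hcnt⟩))
        · have hx : x = cur ∧ 2 ≤ run := by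
            by_cases h2 : 2 ≤ run
            · rw [if_pos h2] at hmem
              exact ⟨List.mem_singleton.mp hmem, h2⟩
            · rw [if_neg h2] at hmem
              exact absurd hmem (List.not_mem_nil)
          exact Or.inl ⟨hx.1, by omega⟩
        · refine Or.inr ⟨List.mem_cons_self, hcy, ?_⟩
          rw [List.count_cons_self]
          omega
        · refine Or.inr ⟨List.mem_cons_of_mem _ hm, lt_trans hcy hlt, ?_⟩
          rw [List.count_cons_of_ne (ne_of_lt hlt)]
          exact hcnt
      · rintro (⟨rfl, h⟩ | ⟨hm, hlt, hcnt⟩)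
        · rw [hcnt0] at h
          have h2 : 2 ≤ run := by omega
          left
          rw [if_pos h2]
          exact List.mem_singleton.mpr rfl
        · right
          by_cases hxy : x = y
          · subst hxy
            rw [List.count_cons_self] at hcnt
            exact Or.inl ⟨rfl, by omega⟩
          · have hm' : x ∈ rest := by
              rcases List.mem_cons.mp hm with h' | h'
              · exact absurd h' hxy
              · exact h'
            refine Or.inr ⟨hm', lt_of_le_of_ne (hy x hm') (fun h' => hxy h'.symm), ?_⟩
            rw [List.count_cons_of_ne (Ne.symm hxy)] at hcnt
            exact hcnt

lemma runAux_lb (cur : String) (run : Nat) (l : List String)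
    (hs : l.Pairwise (· ≤ ·)) (hc : ∀ y ∈ l, cur ≤ y) :
    ∀ x ∈ runAux cur run l, cur ≤ x := by
  induction l generalizing cur run with
  | nil =>
    intro x hx
    rw [runAux] at hx
    split_ifs at hx <;> simp_all
  | cons y rest ih =>
    intro x hx
    have hs' : rest.Pairwise (· ≤ ·) := hs.of_cons
    have hy : ∀ z ∈ rest, y ≤ z := (List.pairwise_cons.mp hs).1
    by_cases hyc : y = cur
    · subst hyc
      rw [runAux, if_pos rfl] at hx
      exact ih y (run + 1) hs' hy x hx
    · rw [runAux, if_neg hyc, List.mem_append] at hx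
      rcases hx with hx | hx
      · split_ifs at hx <;> simp_all
      · exact le_trans (hc y List.mem_cons_self) (ih y 1 hs' hy x hx)

lemma runAux_pairwise (cur : String) (run : Nat) (l : List String)
    (hs : l.Pairwise (· ≤ ·)) (hc : ∀ y ∈ l, cur ≤ y) :
    (runAux cur run l).Pairwise (· < ·) := by
  induction l generalizing cur run with
  | nil =>
    rw [runAux]
    split_ifs <;> simp
  | cons y rest ih =>
    have hs' : rest.Pairwise (· ≤ ·) := hs.of_cons
    have hy : ∀ z ∈ rest, y ≤ z := (List.pairwise_cons.mp hs).1
    by_cases hyc : y = cur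
    · subst hyc
      rw [runAux, if_pos rfl]
      exact ih y (run + 1) hs' hy
    · have hcy : cur < y := lt_of_le_of_ne (hc y List.mem_cons_self) (fun h => hyc h.symm)
      rw [runAux, if_neg hyc]
      refine List.pairwise_append.mpr ⟨?_, ih y 1 hs' hy, ?_⟩
      · split_ifs <;> simp
      · intro a ha b hb
        have hb' : y ≤ b := runAux_lb y 1 rest hs' hy b hb
        have ha' : a = cur := by split_ifs at ha <;> simp_all
        subst ha'
        exact lt_of_lt_of_le hcy hb'

lemma B_characterization (xs : List String) (x : String) :
    x ∈ (match PySem.List.sorted xs (fun x => x) false with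
         | [] => []
         | x0 :: rest => runAux x0 1 rest) ↔ 2 ≤ xs.count x := by
  have hperm : (PySem.List.sorted xs (fun x => x) false).Perm xs := PySem.List.sorted_perm xs (fun x => x) false
  have hpw : (PySem.List.sorted xs (fun x => x) false).Pairwise (· ≤ ·) := by
    have := PySem.List.sorted_pairwise (xs := xs) (key := fun x => x)
    simpa using this
  rw [← hperm.count_eq]
  cases hsrt : PySem.List.sorted xs (fun x => x) false with
  | nil => simp
  | cons x0 rest =>
    rw [hsrt] at hpw
    have hs' : rest.Pairwise (· ≤ ·) := hpw.of_cons
    have hy : ∀ z ∈ rest, x0 ≤ z := (List.pairwise_cons.mp hpw).1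
    simp only []
    rw [runAux_mem x0 x 1 rest hs' hy]
    constructor
    · rintro (⟨rfl, h⟩ | ⟨hm, hlt, hcnt⟩)
      · rw [List.count_cons_self]; omega
      · rw [List.count_cons_of_ne (ne_of_lt hlt)]
        exact hcnt
    · intro h
      by_cases hxy : x = x0
      · subst hxy
        rw [List.count_cons_self] at h
        exact Or.inl ⟨rfl, by omega⟩
      · have hm : x ∈ rest := by
          have hmem : x ∈ x0 :: rest := by
            rw [← List.count_pos_iff]
            omega
          rcases List.mem_cons.mp hmem with h' | h'
          · exact absurd h' hxy
          · exact h'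
        right
        refine ⟨hm, lt_of_le_of_ne (hy x hm) (fun h' => hxy h'.symm), ?_⟩
        rw [List.count_cons_of_ne (Ne.symm hxy)] at h
        exact h

lemma B_pairwise (xs : List String) :
    (match PySem.List.sorted xs (fun x => x) false with
     | [] => []
     | x0 :: rest => runAux x0 1 rest).Pairwise (· < ·) := by
  have hpw : (PySem.List.sorted xs (fun x => x) false).Pairwise (· ≤ ·) := by
    have := PySem.List.sorted_pairwise (xs := xs) (key := fun x => x)
    simpa using this
  cases hsrt : PySem.List.sorted xs (fun x => x) false with
  | nil => simp
  | cons x0 rest =>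
    rw [hsrt] at hpw
    exact runAux_pairwise x0 1 rest hpw.of_cons (List.pairwise_cons.mp hpw).1

-- ===== VERDICT (by name: the statement is the Claim_ definition above) =====
theorem transactionThreashold_spec : Claim_equal_transactionThreashold := by
  intro logs _ _
  unfold Spec_transactionThreashold
  rw [A_eq_sorted_filter]
  unfold transactionThreashold_alt
  set flat := pvFlat logs with hflatdef
  have hflat : (logs.flatMap (fun log =>
      PySem.Set.ofList (PySem.List.slice (((PySem.Str.split? ((PySem.List.pyGet? log 0).getD "") " ").getD [])) none (some 2)))) = flat := rfl
  simp only [hflat]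
  set ys := (match PySem.List.sorted flat (fun x => x) false with
             | [] => []
             | x0 :: rest => runAux x0 1 rest) with hys
  have hyspw : ys.Pairwise (· < ·) := B_pairwise flat
  have hysmem : ∀ x, x ∈ ys ↔ 2 ≤ flat.count x := fun x => B_characterization flat x
  have husermem : ∀ x, x ∈ (PySem.Set.ofList flat).filter
      (fun k => decide ((2:Int) ≤ (flat.count k : Int))) ↔ 2 ≤ flat.count x := by
    intro x
    rw [List.mem_filter]
    constructor
    · rintro ⟨_, h2⟩
      simp at h2
      exact_mod_cast h2
    · intro h
      refine ⟨(PySem.Set.mem_ofList flat x).mpr ?_, by simp; exact_mod_cast h⟩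
      rw [← List.count_pos_iff]
      omega
  have hnodupU : ((PySem.Set.ofList flat).filter
      (fun k => decide ((2:Int) ≤ (flat.count k : Int)))).Nodup :=
    (PySem.Set.nodup_ofList flat).filter _
  have hnodupY : ys.Nodup := hyspw.imp ne_of_lt
  have hperm : ys.Perm ((PySem.Set.ofList flat).filter
      (fun k => decide ((2:Int) ≤ (flat.count k : Int)))) := by
    rw [List.perm_ext_iff_of_nodup hnodupY hnodupU]
    intro a
    rw [hysmem a, husermem a]
  exact PySem.List.sorted_eq_of_perm_of_pairwise_lt _ _ _ hperm hyspw
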